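-- pv_equiv track=rewrite | github.com/pai10464/python | moredc/moredc_34.py | pattern2
-- ===== SOURCE A (Python) =====
-- def pattern2(nrows, ncols):
--     ans = []
--     i = 1
--     for e in range(nrows):
--         ans.append([])
--     for e in range(ncols):
--         for j in range(nrows):
--             ans[j].append(i)
--             i += 1
--     return ans
-- ===== SOURCE B (Python) =====
-- def pattern2(nrows, ncols):
--     # Each cell is computed by closed-form index arithmetic: row j, column e holds e*nrows + j + 1.
--     return [[e * nrows + j + 1 for e in range(ncols)] for j in range(nrows)]
-- ===== Notes on version B (the rewrite author's own statement) =====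
-- stated objective: simpler
-- what changed: Replaced A's mutable running counter and column-major appending into pre-initialized empty rows with a row-major nested comprehension where each cell is computed by the closed form e*nrows + j + 1.
import Mathlib
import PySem

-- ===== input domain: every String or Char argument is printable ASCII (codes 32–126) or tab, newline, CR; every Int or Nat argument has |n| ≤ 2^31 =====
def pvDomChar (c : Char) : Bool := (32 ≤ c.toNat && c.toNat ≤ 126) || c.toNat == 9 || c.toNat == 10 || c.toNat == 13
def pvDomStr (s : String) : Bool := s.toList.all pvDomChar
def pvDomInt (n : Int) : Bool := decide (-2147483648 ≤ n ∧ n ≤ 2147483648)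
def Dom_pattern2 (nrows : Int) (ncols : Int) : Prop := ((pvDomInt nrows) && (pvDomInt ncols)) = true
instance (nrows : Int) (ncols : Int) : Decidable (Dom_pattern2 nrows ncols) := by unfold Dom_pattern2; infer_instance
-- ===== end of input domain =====

-- B replaces A's mutable counter and column-major appending with a row-major build
-- where each cell is the closed form e*nrows + j + 1 (objective: simpler).

-- ===== PORT A =====
-- helper for `ans[j].append(i)`: rebuilds the list with element j extended.
-- Exact here: in A the index j always satisfies 0 ≤ j < len(ans), so no IndexError arises.
def appendAt (xs : List (List Int)) (j : Nat) (v : Int) : List (List Int) :=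
  match xs, j with
  | [], _ => []
  | r :: rs, 0 => (r ++ [v]) :: rs
  | r :: rs, Nat.succ j' => r :: appendAt rs j' v

def pattern2 (nrows : Int) (ncols : Int) : List (List Int) :=
  -- ans = []; for e in range(nrows): ans.append([])
  let ans : List (List Int) :=
    (PySem.List.pyRange 0 nrows 1).foldl (fun a _ => a ++ [([] : List Int)]) []
  -- i = 1; for e in range(ncols): for j in range(nrows): ans[j].append(i); i += 1
  let st : List (List Int) × Int :=
    (PySem.List.pyRange 0 ncols 1).foldl
      (fun st _e =>
        (PySem.List.pyRange 0 nrows 1).foldl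
          (fun st j => (appendAt st.1 j.toNat st.2, st.2 + 1)) st)
      (ans, 1)
  st.1

-- ===== PORT B =====
def pattern2_alt (nrows : Int) (ncols : Int) : List (List Int) :=
  (PySem.List.pyRange 0 nrows 1).map (fun j =>
    (PySem.List.pyRange 0 ncols 1).map (fun e => e * nrows + j + 1))

-- ===== PRECONDITION & SPEC =====
def Spec_pattern2 (nrows : Int) (ncols : Int) (out : List (List Int)) : Prop := out = pattern2_alt nrows ncols
instance (nrows : Int) (ncols : Int) (out : List (List Int)) : Decidable (Spec_pattern2 nrows ncols out) := by unfold Spec_pattern2; infer_instance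

-- ===== CLAIM (what is proved, stated in full; the proofs are below) =====
def Claim_equal_pattern2 : Prop := ∀ (nrows : Int) (ncols : Int), Dom_pattern2 nrows ncols → Spec_pattern2 nrows ncols (pattern2 nrows ncols)

-- ===== LEMMAS AND PROOFS =====

theorem pyRange_nat (n : Int) :
    PySem.List.pyRange 0 n 1 = (List.range n.toNat).map (fun (k : Nat) => (k : Int)) := by
  rw [PySem.List.pyRange_one, Int.sub_zero]
  exact List.map_congr_left (fun k _ => by omega)

-- A's row-init loop builds init ++ replicate n [].
theorem foldl_append_nil (l : List Int) (init : List (List Int)) :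
    l.foldl (fun a _ => a ++ [([] : List Int)]) init = init ++ List.replicate l.length [] := by
  induction l generalizing init with
  | nil => simp
  | cons x xs ih =>
      simp [List.foldl_cons, ih, List.replicate_succ, List.append_assoc]

-- one pass of A's inner loop, written functionally
def appRow (xs : List (List Int)) (i : Int) : List (List Int) :=
  match xs with
  | [] => []
  | r :: rs => (r ++ [i]) :: appRow rs (i + 1)

theorem appendAt_append (pre : List (List Int)) (r : List Int) (rs : List (List Int)) (v : Int) :
    appendAt (pre ++ r :: rs) pre.length v = pre ++ (r ++ [v]) :: rs := by
  induction pre with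
  | nil => rfl
  | cons p ps ih => simp [appendAt, ih]

theorem inner_loop (ans pre : List (List Int)) (i : Int) :
    (List.range' pre.length ans.length).foldl
        (fun (st : List (List Int) × Int) j => (appendAt st.1 j st.2, st.2 + 1)) (pre ++ ans, i)
      = (pre ++ appRow ans i, i + ans.length) := by
  induction ans generalizing pre i with
  | nil => simp [appRow]
  | cons r rs ih =>
      rw [List.length_cons, List.range'_succ, List.foldl_cons]
      have h1 : appendAt (pre ++ r :: rs) pre.length i = pre ++ (r ++ [i]) :: rs :=
        appendAt_append pre r rs i
      have h2 := ih (pre ++ [r ++ [i]]) (i + 1)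
      simp only [h1]
      have hlen : pre.length + 1 = (pre ++ [r ++ [i]]).length := by simp
      rw [show pre ++ (r ++ [i]) :: rs = (pre ++ [r ++ [i]]) ++ rs by simp, hlen, h2]
      simp [appRow, List.append_assoc]
      omega

theorem appRow_range' (n : Nat) : ∀ (a : Nat) (g : Nat → List Int) (i : Int),
    appRow ((List.range' a n).map g) i
      = (List.range' a n).map (fun j => g j ++ [i + (j : Int) - (a : Int)]) := by
  induction n with
  | zero => intro a g i; simp [appRow]
  | succ n ih =>
      intro a g i
      rw [List.range'_succ]
      simp only [List.map_cons, appRow, ih (a + 1) g (i + 1)]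
      congr 1
      · simp
      · apply List.map_congr_left
        intro j _
        congr 2
        push_cast
        ring

theorem pattern2_eq_alt (nrows ncols : Int) : pattern2 nrows ncols = pattern2_alt nrows ncols := by
  unfold pattern2 pattern2_alt
  rw [pyRange_nat nrows, pyRange_nat ncols, foldl_append_nil]
  simp only [List.foldl_map, List.map_map, List.length_map, List.length_range,
    Int.toNat_natCast, Function.comp_def, List.nil_append]
  set N := nrows.toNat with hN
  set C := ncols.toNat with hC
  rcases Int.lt_or_le nrows 0 with hneg | hpos
  · -- no rows at all: both sides are []
    have h0 : N = 0 := by omega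
    rw [h0]
    simp
  · -- 0 ≤ nrows, so (N : Int) = nrows
    have hNr : (N : Int) = nrows := Int.toNat_of_nonneg hpos
    suffices h : ∀ c : Nat,
        (List.range c).foldl
          (fun (st : List (List Int) × Int) _ =>
            (List.range N).foldl (fun st k => (appendAt st.1 k st.2, st.2 + 1)) st)
          (List.replicate N [], 1)
        = ((List.range N).map (fun (j : Nat) =>
            (List.range c).map (fun (e : Nat) => (e : Int) * nrows + (j : Int) + 1)),
           (c : Int) * nrows + 1) by
      rw [h C]
    intro c
    induction c with
    | zero =>
        simp only [List.range_zero, List.foldl_nil, List.map_nil, Nat.cast_zero, zero_mul,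
          zero_add, Prod.mk.injEq]
        refine ⟨?_, trivial⟩
        rw [eq_comm, List.eq_replicate_iff]
        simp
    | succ c ih =>
        rw [List.range_succ, List.foldl_append, List.foldl_cons, List.foldl_nil, ih]
        set B : List (List Int) := (List.range N).map (fun (j : Nat) =>
            (List.range c).map (fun (e : Nat) => (e : Int) * nrows + (j : Int) + 1)) with hBdef
        have hBlen : B.length = N := by simp [hBdef]
        have hinner := inner_loop B [] ((c : Int) * nrows + 1)
        simp only [List.nil_append, List.length_nil, hBlen] at hinner
        rw [show List.range N = List.range' 0 N from List.range_eq_range', hinner]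
        simp only [Prod.mk.injEq]
        constructor
        · rw [hBdef, show List.range N = List.range' 0 N from List.range_eq_range',
            appRow_range']
          apply List.map_congr_left
          intro j _
          simp only [List.map_append, List.map_cons, List.map_nil]
          congr 2
          push_cast
          ring
        · rw [hNr]
          push_cast
          ring

-- ===== VERDICT (by name: the statement is the Claim_ definition above) =====
theorem pattern2_spec : Claim_equal_pattern2 := by
  intro nrows ncols _
  unfold Spec_pattern2
  exact pattern2_eq_alt nrows ncols
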